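-- pv_equiv track=rewrite | github.com/MrBrantCode/unitest_baseline | mut_generate/mist_train_taco/taco_1281/solution.py | calculate_sum_of_f_over_subsets
-- ===== SOURCE A (Python) =====
-- def calculate_sum_of_f_over_subsets(points, mod=998244353):
--     N = len(points)
--     compression_dict_x = {a: ind for (ind, a) in enumerate(sorted(set([p[0] for p in points])))}
--     points = [[compression_dict_x[x] + 1, y] for (x, y) in points]
--     P_Y = sorted(points, key=lambda x: x[1])
--     LEN = len(compression_dict_x)
--     BIT = [0] * (LEN + 1)
--
--     def update(v, w):
--         while v <= LEN:
--             BIT[v] += w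
--             v += v & -v
--
--     def getvalue(v):
--         ANS = 0
--         while v != 0:
--             ANS += BIT[v]
--             v -= v & -v
--         return ANS
--
--     ANS = 4 * N + (pow(2, N, mod) - 1) * (N - 4) % mod
--     for i in range(N):
--         (x, y) = P_Y[i]
--         left = getvalue(x)
--         ANS = (ANS + pow(2, left, mod) + pow(2, i - left, mod) - 2) % mod
--         update(x, 1)
--
--     P_Y.reverse()
--     BIT = [0] * (LEN + 1)
--     for i in range(N):
--         (x, y) = P_Y[i]
--         left = getvalue(x)
--         ANS = (ANS + pow(2, left, mod) + pow(2, i - left, mod) - 2) % mod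
--         update(x, 1)
--
--     return ANS
-- ===== SOURCE B (Python) =====
-- def calculate_sum_of_f_over_subsets(points, mod=998244353):
--     N = len(points)
--     comp = {a: i for i, a in enumerate(sorted(set(p[0] for p in points)))}
--     pts = sorted(([comp[x] + 1, y] for (x, y) in points), key=lambda p: p[1])
--     ANS = 4 * N + (pow(2, N, mod) - 1) * (N - 4) % mod
--     for seq in (pts, pts[::-1]):
--         seen = []
--         for i, (x, _y) in enumerate(seq):
--             left = sum(1 for e in seen if e <= x)
--             ANS = (ANS + pow(2, left, mod) + pow(2, i - left, mod) - 2) % mod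
--             seen.append(x)
--     return ANS
-- ===== Notes on version B (the rewrite author's own statement) =====
-- stated objective: simpler
-- what changed: Drops the Fenwick (BIT) tree with its bit-trick update/getvalue helpers entirely; B keeps a plain list of the compressed ranks inserted so far and counts those <= x directly with a linear scan, folding the two identical passes into one loop over (pts, reversed(pts)).
import Mathlib
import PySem

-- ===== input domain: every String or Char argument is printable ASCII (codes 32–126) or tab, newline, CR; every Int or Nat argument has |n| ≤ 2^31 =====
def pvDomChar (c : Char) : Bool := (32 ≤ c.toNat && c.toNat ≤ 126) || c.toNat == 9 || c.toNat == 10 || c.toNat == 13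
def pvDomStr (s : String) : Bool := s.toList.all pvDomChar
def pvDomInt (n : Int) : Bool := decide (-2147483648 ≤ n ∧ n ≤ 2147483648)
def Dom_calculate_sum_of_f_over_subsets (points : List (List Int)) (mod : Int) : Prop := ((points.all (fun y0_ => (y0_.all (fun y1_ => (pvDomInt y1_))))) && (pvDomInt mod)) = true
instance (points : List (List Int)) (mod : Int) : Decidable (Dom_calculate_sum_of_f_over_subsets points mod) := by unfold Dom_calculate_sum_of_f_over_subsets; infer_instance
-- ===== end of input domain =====

-- B replaces A's Fenwick (BIT) tree and its bit-trick update/getvalue loops by a plain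
-- list of the ranks inserted so far and a direct count of those ≤ x (objective: simpler).

-- ===== PORT A =====

-- Termination facts for the two Fenwick loops (cited in their decreasing_by):
-- for v ≥ 1 Python's v & -v is the Nat value v - (v &&& (v-1)), and 1 ≤ v & -v ≤ v.
theorem pvBand_neg_eq (v : Int) (hv : 1 ≤ v) :
    PySem.Int.band v (-v) = ((v.toNat - (v.toNat &&& (v.toNat - 1)) : Nat) : Int) := by
  have h0 : 0 ≤ v := by omega
  have h1 : ¬ 0 ≤ -v := by omega
  simp only [PySem.Int.band, if_pos h0, if_neg h1, neg_neg]
  have : (v - 1).toNat = v.toNat - 1 := by omega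
  rw [this]

theorem pvLowbit_pos_le (v : Int) (hv : 1 ≤ v) :
    1 ≤ PySem.Int.band v (-v) ∧ PySem.Int.band v (-v) ≤ v := by
  rw [pvBand_neg_eq v hv]
  have hland : v.toNat &&& (v.toNat - 1) ≤ v.toNat - 1 := Nat.and_le_right
  omega

-- while v <= LEN: BIT[v] += w; v += v & -v    (guard 1 ≤ v only makes the loop total:
-- every actual call has v ≥ 1, where Python's loop terminates exactly as this recursion does)
def pvUpdate (LEN : Int) (BIT : List Int) (v w : Int) : List Int :=
  if hv : 1 ≤ v then
    if hL : v ≤ LEN then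
      pvUpdate LEN (PySem.List.pySetD BIT v (PySem.List.pyGetD BIT v 0 + w)) (v + PySem.Int.band v (-v)) w
    else BIT
  else BIT
termination_by (LEN + 1 - v).toNat
decreasing_by
  have := pvLowbit_pos_le v hv
  omega

-- ANS = 0; while v != 0: ANS += BIT[v]; v -= v & -v   (guard 1 ≤ v instead of v ≠ 0 only
-- makes the loop total: on every actual call v stays ≥ 0, where the two guards coincide)
def pvGetvalue (BIT : List Int) (v : Int) : Int :=
  if hv : 1 ≤ v then
    PySem.List.pyGetD BIT v 0 + pvGetvalue BIT (v - PySem.Int.band v (-v))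
  else 0
termination_by v.toNat
decreasing_by
  have := pvLowbit_pos_le v hv
  omega

-- for i in range(N): (x,y) = P_Y[i]; left = getvalue(x); ANS = (…) % mod; update(x, 1)
-- (powMod exponents are nonnegative on every reachable call, where .toNat is exact)
def pvLoopA (mod LEN : Int) : List (List Int) → Int → List Int → Int → Int
  | [], _i, _BIT, ANS => ANS
  | p :: rest, i, BIT, ANS =>
    let x := PySem.List.pyGetD p 0 0
    let left := pvGetvalue BIT x
    let ANS' := PySem.Int.mod (ANS + PySem.Int.powMod 2 left.toNat mod + PySem.Int.powMod 2 (i - left).toNat mod - 2) mod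
    pvLoopA mod LEN rest (i + 1) (pvUpdate LEN BIT x 1) ANS'

def calculate_sum_of_f_over_subsets (points : List (List Int)) (mod : Int) : Int :=
  let N : Int := PySem.List.len points
  let compression_dict_x : PySem.Dict Int Int :=
    (PySem.List.enumerate (PySem.List.sorted (PySem.Set.ofList (points.map (fun p => PySem.List.pyGetD p 0 0))) (fun a => a) false) 0).foldl
      (fun d pr => d.insert pr.2 pr.1) PySem.Dict.empty
  let points2 := points.map (fun p => [(compression_dict_x.get? (PySem.List.pyGetD p 0 0)).getD 0 + 1, PySem.List.pyGetD p 1 0])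
  let P_Y := PySem.List.sorted points2 (fun p => PySem.List.pyGetD p 1 0) false
  let LEN : Int := (compression_dict_x.size : Int)
  let BIT : List Int := List.replicate (LEN + 1).toNat 0
  let ANS0 := 4 * N + PySem.Int.mod ((PySem.Int.powMod 2 N.toNat mod - 1) * (N - 4)) mod
  let ANS1 := pvLoopA mod LEN P_Y 0 BIT ANS0
  pvLoopA mod LEN P_Y.reverse 0 BIT ANS1

-- ===== PORT B =====

-- for i, (x, _y) in enumerate(seq): left = sum(1 for e in seen if e <= x); ANS = (…) % mod; seen.append(x)
def pvLoopB (mod : Int) : List (List Int) → Int → List Int → Int → Int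
  | [], _i, _seen, ANS => ANS
  | p :: rest, i, seen, ANS =>
    let x := PySem.List.pyGetD p 0 0
    let left : Int := (seen.countP (fun e => decide (e ≤ x)) : Int)
    let ANS' := PySem.Int.mod (ANS + PySem.Int.powMod 2 left.toNat mod + PySem.Int.powMod 2 (i - left).toNat mod - 2) mod
    pvLoopB mod rest (i + 1) (seen ++ [x]) ANS'

def calculate_sum_of_f_over_subsets_alt (points : List (List Int)) (mod : Int) : Int :=
  let N : Int := PySem.List.len points
  let comp : PySem.Dict Int Int :=
    (PySem.List.enumerate (PySem.List.sorted (PySem.Set.ofList (points.map (fun p => PySem.List.pyGetD p 0 0))) (fun a => a) false) 0).foldl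
      (fun d pr => d.insert pr.2 pr.1) PySem.Dict.empty
  let pts := PySem.List.sorted (points.map (fun p => [(comp.get? (PySem.List.pyGetD p 0 0)).getD 0 + 1, PySem.List.pyGetD p 1 0])) (fun p => PySem.List.pyGetD p 1 0) false
  let ANS0 := 4 * N + PySem.Int.mod ((PySem.Int.powMod 2 N.toNat mod - 1) * (N - 4)) mod
  let ANS1 := pvLoopB mod pts 0 [] ANS0
  pvLoopB mod pts.reverse 0 [] ANS1   -- pts[::-1] is pts.reverse

-- ===== PRECONDITION & SPEC =====
-- Pre_ excludes exactly the inputs where A raises: a point of length ≠ 2 (unpacking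
-- '(x, y) = p' raises ValueError / IndexError) and mod = 0 (pow(2, N, 0) raises ValueError).
def Pre_calculate_sum_of_f_over_subsets (points : List (List Int)) (mod : Int) : Prop :=
  mod ≠ 0 ∧ ∀ p ∈ points, p.length = 2
instance (points : List (List Int)) (mod : Int) : Decidable (Pre_calculate_sum_of_f_over_subsets points mod) := by unfold Pre_calculate_sum_of_f_over_subsets; infer_instance

def pvWitness_calculate_sum_of_f_over_subsets : List (List Int) × Int := ([[1, 2], [3, 4], [1, 0]], 7)

def Spec_calculate_sum_of_f_over_subsets (points : List (List Int)) (mod : Int) (out : Int) : Prop := out = calculate_sum_of_f_over_subsets_alt points mod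
instance (points : List (List Int)) (mod : Int) (out : Int) : Decidable (Spec_calculate_sum_of_f_over_subsets points mod out) := by unfold Spec_calculate_sum_of_f_over_subsets; infer_instance

-- ===== CLAIM (what is proved, stated in full; the proofs are below) =====
def Claim_equal_calculate_sum_of_f_over_subsets : Prop := ∀ (points : List (List Int)) (mod : Int), Dom_calculate_sum_of_f_over_subsets points mod → Pre_calculate_sum_of_f_over_subsets points mod → Spec_calculate_sum_of_f_over_subsets points mod (calculate_sum_of_f_over_subsets points mod)

-- ===== LEMMAS AND PROOFS =====

-- count of elements ≤ v, as an Int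
def pvCnt (seen : List Int) (v : Int) : Int := (seen.countP (fun e => decide (e ≤ v)) : Int)

-- Fenwick invariant: cell v holds the number of inserted elements in (v - lowbit v, v]
def pvInv (LEN : Int) (BIT : List Int) (seen : List Int) : Prop :=
  ∀ v : Int, 1 ≤ v → v ≤ LEN →
    PySem.List.pyGetD BIT v 0 = pvCnt seen v - pvCnt seen (v - PySem.Int.band v (-v))

-- n &&& (n-1) clears the lowest set bit: n - (n &&& (n-1)) is 2^k where 2^k exactly divides n.
theorem pvLbN_spec (n : Nat) (hn : 0 < n) :
    ∃ k m : Nat, n = 2 ^ k * (2 * m + 1) ∧ n - (n &&& (n - 1)) = 2 ^ k := by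
  induction n using Nat.strong_induction_on with
  | _ n ih =>
    rcases Nat.even_or_odd n with he | ho
    · obtain ⟨w, hw⟩ := he
      have hw0 : 0 < w := by omega
      obtain ⟨k, m, h1, h2⟩ := ih w (by omega) hw0
      have hland : n &&& (n - 1) = 2 * (w &&& (w - 1)) := by
        apply Nat.eq_of_testBit_eq
        intro i
        cases i with
        | zero =>
          have hn2 : n % 2 = 0 := by omega
          simp [Nat.testBit_zero, hn2, Nat.mul_mod_right]
        | succ j =>
          rw [Nat.testBit_land, Nat.testBit_succ, Nat.testBit_succ, Nat.testBit_succ]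
          have e1 : n / 2 = w := by omega
          have e2 : (n - 1) / 2 = w - 1 := by omega
          have e3 : 2 * (w &&& (w - 1)) / 2 = w &&& (w - 1) := by omega
          rw [e1, e2, e3, ← Nat.testBit_land]
      have hle : w &&& (w - 1) ≤ w - 1 := Nat.and_le_right
      refine ⟨k + 1, m, by rw [hw, h1]; ring, ?_⟩
      have : 2 ^ (k + 1) = 2 * 2 ^ k := by ring
      omega
    · obtain ⟨m, hm⟩ := ho
      have hland : n &&& (n - 1) = 2 * m := by
        apply Nat.eq_of_testBit_eq
        intro i
        cases i with
        | zero =>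
          have hn2 : (n - 1) % 2 = 0 := by omega
          simp [Nat.testBit_zero, hn2, Nat.mul_mod_right]
        | succ j =>
          rw [Nat.testBit_land, Nat.testBit_succ, Nat.testBit_succ, Nat.testBit_succ]
          have e1 : n / 2 = m := by omega
          have e2 : (n - 1) / 2 = m := by omega
          have e3 : 2 * m / 2 = m := by omega
          rw [e1, e2, e3, Bool.and_self]
      exact ⟨0, m, by omega, by omega⟩

-- the Int form: for v ≥ 1, v & -v is the largest power of two dividing v
theorem pvLb_spec (v : Int) (hv : 1 ≤ v) :
    ∃ k : Nat, PySem.Int.band v (-v) = 2 ^ k ∧ ((2 : Int) ^ k ∣ v) ∧ ¬ ((2 : Int) ^ (k + 1) ∣ v) := by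
  obtain ⟨k, m, h1, h2⟩ := pvLbN_spec v.toNat (by omega)
  have hvc : ((v.toNat : Int)) = v := by omega
  refine ⟨k, ?_, ?_, ?_⟩
  · rw [pvBand_neg_eq v hv, h2]; push_cast; ring
  · have : (2 : Int) ^ k ∣ ((v.toNat : Int)) := by
      refine ⟨(2 * m + 1 : Nat), ?_⟩
      rw [← Nat.cast_ofNat, ← Nat.cast_pow, ← Nat.cast_mul, ← h1]
    rwa [hvc] at this
  · intro hdvd
    rw [← hvc] at hdvd
    have h2' : ((2 ^ (k + 1) : Nat) : Int) ∣ ((v.toNat : Int)) := by push_cast; exact hdvd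
    have hN : 2 ^ (k + 1) ∣ v.toNat := Int.natCast_dvd_natCast.mp h2'
    rw [h1, pow_succ] at hN
    have h2k : 0 < 2 ^ k := Nat.two_pow_pos k
    have : 2 ∣ 2 * m + 1 := (Nat.mul_dvd_mul_iff_left h2k).mp hN
    omega

-- stepping the update path at least doubles the lowbit
theorem pvLb_next (p : Int) (hp : 1 ≤ p) :
    2 * PySem.Int.band p (-p) ≤ PySem.Int.band (p + PySem.Int.band p (-p)) (-(p + PySem.Int.band p (-p))) := by
  obtain ⟨k, hk, hkd, hkn⟩ := pvLb_spec p hp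
  have h2k : (0 : Int) < 2 ^ k := pow_pos (by norm_num) k
  have hp' : 1 ≤ p + PySem.Int.band p (-p) := by rw [hk]; omega
  obtain ⟨j, hj, hjd, hjn⟩ := pvLb_spec _ hp'
  obtain ⟨c, hc⟩ := hkd
  have hcodd : c % 2 = 1 := by
    rcases Int.emod_two_eq_zero_or_one c with h | h
    · exfalso; apply hkn
      obtain ⟨c', hc'⟩ : (2 : Int) ∣ c := Int.dvd_of_emod_eq_zero h
      exact ⟨c', by rw [hc, hc', pow_succ]; ring⟩
    · exact h
  have hdvd1 : (2 : Int) ^ (k + 1) ∣ p + PySem.Int.band p (-p) := by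
    obtain ⟨c', hc'⟩ : (2 : Int) ∣ c + 1 := by omega
    exact ⟨c', by rw [hk, hc, pow_succ]; rw [mul_comm (2:Int) c'] at *; nlinarith [hc']⟩
  have hkj : k + 1 ≤ j := by
    by_contra hlt
    exact hjn (dvd_trans (pow_dvd_pow 2 (by omega)) hdvd1)
  rw [hj]
  rw [hk]
  calc 2 * (2:Int) ^ k = 2 ^ (k+1) := by ring
    _ ≤ 2 ^ j := by
      apply pow_le_pow_right₀ (by norm_num) hkj

-- no Fenwick node strictly between p and p + lowbit(p) covers any x ≤ p
theorem pvGap (x p v : Int) (hx : 1 ≤ x) (hxp : x ≤ p) (hpv : p < v)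
    (hcov : v - PySem.Int.band v (-v) < x) : p + PySem.Int.band p (-p) ≤ v := by
  by_contra h
  push Not at h
  obtain ⟨k, hk, hkd, _⟩ := pvLb_spec p (by omega)
  obtain ⟨j, hj, hjd, _⟩ := pvLb_spec v (by omega)
  have htk : (2:Int) ^ (min k j) ∣ v - p :=
    dvd_sub (dvd_trans (pow_dvd_pow 2 (min_le_right k j)) hjd)
            (dvd_trans (pow_dvd_pow 2 (min_le_left k j)) hkd)
  have hle : 2 ^ (min k j) ≤ v - p := Int.le_of_dvd (by omega) htk
  have hvp1 : v - p < 2 ^ j := by rw [hj] at hcov; omega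
  have hvp2 : v - p < 2 ^ k := by rw [hk] at h; omega
  rcases le_total k j with hkj | hkj
  · rw [min_eq_left hkj] at hle; omega
  · rw [min_eq_right hkj] at hle; omega

theorem pvUpdate_length (LEN : Int) : ∀ (p : Int) (BIT : List Int) (w : Int),
    (pvUpdate LEN BIT p w).length = BIT.length := by
  intro p BIT w
  induction BIT, p using pvUpdate.induct LEN (w := w) with
  | case1 BIT v hv hL ih =>
    rw [pvUpdate]
    simp only [dif_pos hv, dif_pos hL]
    rw [ih, PySem.List.length_pySetD]
  | case2 BIT v hv hL => rw [pvUpdate]; simp only [dif_pos hv, dif_neg hL]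
  | case3 BIT v hv => rw [pvUpdate]; simp only [dif_neg hv]

-- effect of update(x, 1) started at path node p on every cell v ∈ [1, LEN]
theorem pvUpdate_getD (LEN x : Int) (hx : 1 ≤ x) : ∀ (p : Int) (BIT : List Int),
    BIT.length = (LEN + 1).toNat → x ≤ p → p - PySem.Int.band p (-p) < x →
    ∀ v : Int, 1 ≤ v → v ≤ LEN →
      PySem.List.pyGetD (pvUpdate LEN BIT p 1) v 0 =
        PySem.List.pyGetD BIT v 0 + (if p ≤ v ∧ v - PySem.Int.band v (-v) < x then 1 else 0) := by
  intro p BIT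
  induction BIT, p using pvUpdate.induct LEN (w := 1) with
  | case1 BIT q h1 h2 ih =>
    intro hlen hxq hcovq v hv1 hv2
    have hlbq := pvLowbit_pos_le q h1
    have hlbv := pvLowbit_pos_le v hv1
    have hnext := pvLb_next q h1
    rw [pvUpdate]
    simp only [dif_pos h1, dif_pos h2]
    rw [ih (by rw [PySem.List.length_pySetD]; exact hlen) (by omega) (by omega) v hv1 hv2]
    have hqlen : (q.toNat : Int) < (BIT.length : Int) := by rw [hlen]; omega
    have hvlen : (v.toNat : Int) < (BIT.length : Int) := by rw [hlen]; omega
    rw [PySem.List.pySetD_of_nonneg BIT _ (by omega)]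
    have hset : PySem.List.pyGetD (BIT.set q.toNat (PySem.List.pyGetD BIT q 0 + 1)) v 0
        = if v = q then PySem.List.pyGetD BIT q 0 + 1 else PySem.List.pyGetD BIT v 0 := by
      rw [PySem.List.pyGetD_eq_getElem _ _ (by omega) (by simp; omega)]
      rw [List.getElem_set]
      by_cases hvq : v = q
      · rw [if_pos (by omega : q.toNat = v.toNat), if_pos hvq]
      · rw [if_neg (by omega : ¬ q.toNat = v.toNat), if_neg hvq]
        exact (PySem.List.pyGetD_eq_getElem _ _ (by omega) (by omega)).symm
    rw [hset]
    by_cases hvq : v = q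
    · subst hvq
      rw [if_pos rfl, if_neg (by omega), if_pos (by constructor <;> omega)]
      ring
    · rw [if_neg hvq]
      by_cases hcond : q ≤ v ∧ v - PySem.Int.band v (-v) < x
      · rw [if_pos hcond]
        rw [if_pos ⟨pvGap x q v hx hxq (by omega) hcond.2, hcond.2⟩]
      · rw [if_neg hcond, if_neg (by intro ⟨ha, hb⟩; exact hcond ⟨by omega, hb⟩)]
  | case2 BIT q h1 h2 =>
    intro hlen hxq hcovq v hv1 hv2
    rw [pvUpdate]
    simp only [dif_pos h1, dif_neg h2]
    rw [if_neg (by intro ⟨ha, _⟩; omega)]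
    ring
  | case3 BIT q h1 =>
    intro hlen hxq hcovq v hv1 hv2
    omega

theorem pvGetvalue_eq (LEN : Int) (BIT seen : List Int) (hinv : pvInv LEN BIT seen)
    (hpos : ∀ e ∈ seen, 1 ≤ e) :
    ∀ v : Int, 0 ≤ v → v ≤ LEN → pvGetvalue BIT v = pvCnt seen v := by
  suffices H : ∀ (n : Nat) (v : Int), v.toNat = n → 0 ≤ v → v ≤ LEN → pvGetvalue BIT v = pvCnt seen v by
    exact fun v h1 h2 => H v.toNat v rfl h1 h2
  intro n
  induction n using Nat.strong_induction_on with
  | _ n ih =>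
    intro v hn h0 hL
    rw [pvGetvalue]
    by_cases hv : 1 ≤ v
    · have hlb := pvLowbit_pos_le v hv
      rw [dif_pos hv, ih (v - PySem.Int.band v (-v)).toNat (by omega) _ rfl (by omega) (by omega),
          hinv v hv hL]
      ring
    · rw [dif_neg hv]
      have hv0 : v = 0 := by omega
      subst hv0
      unfold pvCnt
      rw [List.countP_eq_zero.mpr (by intro e he; simpa using by have := hpos e he; omega)]
      simp

theorem pvCnt_append_singleton (seen : List Int) (x v : Int) :
    pvCnt (seen ++ [x]) v = pvCnt seen v + (if x ≤ v then 1 else 0) := by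
  unfold pvCnt
  rw [List.countP_append]
  by_cases h : x ≤ v <;> simp [h]

theorem pvInv_update (LEN : Int) (BIT seen : List Int) (x : Int) (hx1 : 1 ≤ x) (hxL : x ≤ LEN)
    (hlen : BIT.length = (LEN + 1).toNat) (hinv : pvInv LEN BIT seen) :
    pvInv LEN (pvUpdate LEN BIT x 1) (seen ++ [x]) := by
  intro v hv1 hv2
  have hlbx := pvLowbit_pos_le x hx1
  have hlbv := pvLowbit_pos_le v hv1
  rw [pvUpdate_getD LEN x hx1 x BIT hlen le_rfl (by omega) v hv1 hv2,
      hinv v hv1 hv2, pvCnt_append_singleton, pvCnt_append_singleton]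
  split_ifs <;> omega

theorem pvLoop_eq (mod LEN : Int) : ∀ (pts : List (List Int)) (i ANS : Int) (BIT seen : List Int),
    (∀ p ∈ pts, 1 ≤ PySem.List.pyGetD p 0 0 ∧ PySem.List.pyGetD p 0 0 ≤ LEN) →
    (∀ e ∈ seen, 1 ≤ e) →
    BIT.length = (LEN + 1).toNat →
    pvInv LEN BIT seen →
    pvLoopA mod LEN pts i BIT ANS = pvLoopB mod pts i seen ANS := by
  intro pts
  induction pts with
  | nil => intro i ANS BIT seen _ _ _ _; rfl
  | cons p rest ih =>
    intro i ANS BIT seen hpts hseen hlen hinv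
    obtain ⟨hx1, hxL⟩ := hpts p (List.mem_cons_self)
    have hleft : pvGetvalue BIT (PySem.List.pyGetD p 0 0) = pvCnt seen (PySem.List.pyGetD p 0 0) :=
      pvGetvalue_eq LEN BIT seen hinv hseen _ (by omega) hxL
    simp only [pvLoopA, pvLoopB]
    rw [hleft]
    show pvLoopA mod LEN rest (i + 1) (pvUpdate LEN BIT (PySem.List.pyGetD p 0 0) 1) _ = _
    rw [ih (i + 1) _ _ (seen ++ [PySem.List.pyGetD p 0 0])
        (fun q hq => hpts q (List.mem_cons_of_mem p hq))
        (by intro e he; rcases List.mem_append.mp he with h | h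
            · exact hseen e h
            · simp at h; omega)
        (by rw [pvUpdate_length, hlen])
        (pvInv_update LEN BIT seen _ hx1 hxL hlen hinv)]
    rfl

-- every value stored by the compression fold came from an enumerate index < l.length
theorem pvDictFold_val (l : List (Int × Int)) : ∀ (d0 : PySem.Dict Int Int) (k v : Int),
    ((l.foldl (fun d pr => d.insert pr.2 pr.1) d0).get? k = some v) →
    (∃ pr ∈ l, pr.1 = v) ∨ d0.get? k = some v := by
  induction l with
  | nil => intro d0 k v h; exact Or.inr h
  | cons pr l ih =>
    intro d0 k v h
    rcases ih (d0.insert pr.2 pr.1) k v h with h1 | h1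
    · obtain ⟨q, hq, hqv⟩ := h1
      exact Or.inl ⟨q, List.mem_cons_of_mem pr hq, hqv⟩
    · by_cases hk : k = pr.2
      · subst hk
        rw [PySem.Dict.get?_insert_self] at h1
        exact Or.inl ⟨pr, List.mem_cons_self, Option.some.inj h1⟩
      · rw [PySem.Dict.get?_insert_of_ne _ _ hk] at h1
        exact Or.inr h1

theorem pvDict_val_lt (l : List Int) (k v : Int)
    (h : ((PySem.List.enumerate l 0).foldl (fun d pr => d.insert pr.2 pr.1) PySem.Dict.empty).get? k = some v) :
    0 ≤ v ∧ v < (l.length : Int) := by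
  rcases pvDictFold_val (PySem.List.enumerate l 0) PySem.Dict.empty k v h with h1 | h1
  · obtain ⟨pr, hpr, hv⟩ := h1
    obtain ⟨j, hj, hpre⟩ := (PySem.List.mem_enumerate_iff _ _ _).mp hpr
    subst hpre
    simp only at hv
    omega
  · simp [PySem.Dict.empty, PySem.Dict.get?] at h1

theorem pvDict_size (l : List Int) (hnd : l.Nodup) :
    ((PySem.List.enumerate l 0).foldl (fun d pr => d.insert pr.2 pr.1) (PySem.Dict.empty : PySem.Dict Int Int)).size = l.length := by
  have hkeys : ((PySem.List.enumerate l 0).foldl (fun d pr => d.insert pr.2 pr.1) (PySem.Dict.empty : PySem.Dict Int Int)).keys = l := by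
    rw [PySem.Dict.keys_foldl_insert_key (PySem.List.enumerate l 0) (fun pr => pr.2) (fun d pr => pr.1) PySem.Dict.empty]
    rw [PySem.List.map_snd_enumerate]
    show PySem.Set.update (PySem.Set.empty) l = l
    rw [PySem.Set.update]
    show List.foldl PySem.Set.add [] l = l
    rw [← PySem.Set.ofList_eq_foldl, PySem.Set.ofList_eq_self_of_nodup l hnd]
  calc _ = ((PySem.List.enumerate l 0).foldl (fun d pr => d.insert pr.2 pr.1) (PySem.Dict.empty : PySem.Dict Int Int)).keys.length := by
        simp [PySem.Dict.keys, PySem.Dict.size]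
    _ = l.length := by rw [hkeys]

-- ===== VERDICT (by name: the statement is the Claim_ definition above) =====
theorem calculate_sum_of_f_over_subsets_spec : Claim_equal_calculate_sum_of_f_over_subsets := by
  intro points mod hdom hpre
  unfold Spec_calculate_sum_of_f_over_subsets
  unfold calculate_sum_of_f_over_subsets calculate_sum_of_f_over_subsets_alt
  dsimp only
  set sl := PySem.List.sorted (PySem.Set.ofList (points.map (fun p => PySem.List.pyGetD p 0 0))) (fun a => a) false with hsl
  set d := ((PySem.List.enumerate sl 0).foldl (fun d pr => d.insert pr.2 pr.1) (PySem.Dict.empty : PySem.Dict Int Int)) with hd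
  set LEN : Int := (d.size : Int) with hLENdef
  set PY := PySem.List.sorted (points.map (fun p => [(d.get? (PySem.List.pyGetD p 0 0)).getD 0 + 1, PySem.List.pyGetD p 1 0])) (fun p => PySem.List.pyGetD p 1 0) false with hPY
  set BIT : List Int := (List.replicate (LEN + 1).toNat (0 : Int)) with hBIT
  have hslnd : sl.Nodup := (PySem.Set.nodup_ofList _).perm (PySem.List.sorted_perm _ _ _).symm
  have hLEN : LEN = (sl.length : Int) := by rw [hLENdef, hd, pvDict_size sl hslnd]
  have hLEN0 : 0 ≤ LEN := by rw [hLEN]; omega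
  have hmem : ∀ p ∈ PY, 1 ≤ PySem.List.pyGetD p 0 0 ∧ PySem.List.pyGetD p 0 0 ≤ LEN := by
    intro p hp
    rw [hPY, PySem.List.mem_sorted] at hp
    obtain ⟨q, hq, rfl⟩ := List.mem_map.mp hp
    rw [PySem.List.pyGetD_zero_cons]
    have hx0 : PySem.List.pyGetD q 0 0 ∈ sl := by
      rw [hsl, PySem.List.mem_sorted, PySem.Set.mem_ofList]
      exact List.mem_map.mpr ⟨q, hq, rfl⟩
    have hsl1 : 1 ≤ (sl.length : Int) := by
      have := List.length_pos_of_mem hx0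
      omega
    cases hg : d.get? (PySem.List.pyGetD q 0 0) with
    | none => simp only [Option.getD_none]; omega
    | some v =>
      have hb := pvDict_val_lt sl (PySem.List.pyGetD q 0 0) v (by rw [← hd]; exact hg)
      simp only [Option.getD_some]
      omega
  have hmemr : ∀ p ∈ PY.reverse, 1 ≤ PySem.List.pyGetD p 0 0 ∧ PySem.List.pyGetD p 0 0 ≤ LEN := by
    intro p hp
    exact hmem p (List.mem_reverse.mp hp)
  have hlen : BIT.length = (LEN + 1).toNat := by rw [hBIT, List.length_replicate]
  have hinv0 : pvInv LEN BIT [] := by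
    intro v hv1 hv2
    rw [hBIT, PySem.List.pyGetD_eq_getElem _ _ (by omega) (by rw [List.length_replicate]; omega),
        List.getElem_replicate]
    unfold pvCnt
    simp
  rw [pvLoop_eq mod LEN PY 0 _ BIT [] hmem (by simp) hlen hinv0,
      pvLoop_eq mod LEN PY.reverse 0 _ BIT [] hmemr (by simp) hlen hinv0]
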